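-- pv_equiv track=rewrite | github.com/ai4co/reevo | problems/cvrp_lehd/Transform_data/cvrp_example_transform_data.py | OneRowSolution_to_TwoRow
-- ===== SOURCE A (Python) =====
-- def OneRowSolution_to_TwoRow(ori_solution):
--     solution = ori_solution
--
--     node = []
--     flag = []
--     for i in range(1, len(solution)):
--         if solution[i] != 0:
--             node.append(solution[i])
--         if solution[i] != 0 and solution[i - 1] == 0:
--             flag.append(1)
--         if solution[i] != 0 and solution[i - 1] != 0:
--             flag.append(0)
--     node_flag = node + flag
--     return node_flag
-- ===== SOURCE B (Python) =====
-- def _flush(run, at_start):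
--     # close the current nonzero run: at the start of the solution the leading
--     # element (the depot at index 0) is dropped and contributes no flag
--     if at_start:
--         return run[1:], [0] * (len(run) - 1)
--     if not run:
--         return [], []
--     return run, [1] + [0] * (len(run) - 1)
--
--
-- def OneRowSolution_to_TwoRow(ori_solution):
--     node = []
--     flag = []
--     run = []
--     at_start = True
--     for x in ori_solution:
--         if x != 0:
--             run.append(x)
--         else:
--             n, f = _flush(run, at_start)
--             node += n
--             flag += f
--             run = []
--             at_start = False
--     n, f = _flush(run, at_start)
--     node += n
--     flag += f
--     return node + flag
-- ===== Notes on version B (the rewrite author's own statement) =====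
-- stated objective: alternative
-- what changed: Instead of testing each element's predecessor with three independent ifs per index, B splits the solution into maximal nonzero runs (flushing on each 0) and emits each run's nodes and its flag block (1 followed by 0s; the leading run drops the depot element and starts with flag 0) at once. (run-at-a-time emission does one test per element instead of A's three per-index tests/lookups)
import Mathlib
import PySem

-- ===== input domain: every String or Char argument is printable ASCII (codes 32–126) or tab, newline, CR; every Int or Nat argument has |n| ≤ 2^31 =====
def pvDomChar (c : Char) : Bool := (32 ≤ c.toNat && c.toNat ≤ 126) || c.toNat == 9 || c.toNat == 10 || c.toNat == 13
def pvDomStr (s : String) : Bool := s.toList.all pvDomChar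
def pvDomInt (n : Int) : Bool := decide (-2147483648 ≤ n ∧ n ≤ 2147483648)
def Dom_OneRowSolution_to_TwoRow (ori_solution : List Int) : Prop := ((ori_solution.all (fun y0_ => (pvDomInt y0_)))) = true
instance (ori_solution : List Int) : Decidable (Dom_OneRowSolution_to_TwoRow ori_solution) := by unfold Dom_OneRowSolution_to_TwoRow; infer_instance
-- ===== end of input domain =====

-- B rebuilds the same node+flag output by splitting the solution into maximal
-- nonzero runs (flushing on each 0) instead of testing each element's
-- predecessor; objective: alternative decomposition, same output everywhere.

-- ===== PORT A =====
-- loop body of A's `for i in range(1, len(solution))` (kept as a named helper)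
def pvStepA (solution : List Int) (acc : List Int × List Int) (i : Int) :
    List Int × List Int :=
  let node := if PySem.List.pyGetD solution i 0 ≠ 0 then acc.1 ++ [PySem.List.pyGetD solution i 0] else acc.1
  let flag := if PySem.List.pyGetD solution i 0 ≠ 0 ∧ PySem.List.pyGetD solution (i - 1) 0 = 0 then acc.2 ++ [1] else acc.2
  let flag := if PySem.List.pyGetD solution i 0 ≠ 0 ∧ PySem.List.pyGetD solution (i - 1) 0 ≠ 0 then flag ++ [0] else flag
  (node, flag)

def OneRowSolution_to_TwoRow (ori_solution : List Int) : List Int :=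
  let solution := ori_solution
  let nf := (PySem.List.pyRange 1 solution.length 1).foldl (pvStepA solution) ([], [])
  nf.1 ++ nf.2

-- ===== PORT B =====
-- `_flush(run, at_start)` from Source B
def pvFlush (run : List Int) (atStart : Bool) : List Int × List Int :=
  if atStart then (run.drop 1, List.replicate (run.length - 1) 0)
  else if run = [] then ([], [])
  else (run, 1 :: List.replicate (run.length - 1) 0)

-- the `for x in ori_solution` loop of Source B, carrying (node, flag, run, at_start)
def pvAltLoop (xs node flag run : List Int) (atStart : Bool) : List Int :=
  match xs with
  | [] =>
      let nf := pvFlush run atStart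
      (node ++ nf.1) ++ (flag ++ nf.2)
  | x :: rest =>
      if x ≠ 0 then pvAltLoop rest node flag (run ++ [x]) atStart
      else
        let nf := pvFlush run atStart
        pvAltLoop rest (node ++ nf.1) (flag ++ nf.2) [] false

def OneRowSolution_to_TwoRow_alt (ori_solution : List Int) : List Int :=
  pvAltLoop ori_solution [] [] [] true

-- ===== PRECONDITION & SPEC =====
def Spec_OneRowSolution_to_TwoRow (ori_solution : List Int) (out : List Int) : Prop := out = OneRowSolution_to_TwoRow_alt ori_solution
instance (ori_solution : List Int) (out : List Int) : Decidable (Spec_OneRowSolution_to_TwoRow ori_solution out) := by unfold Spec_OneRowSolution_to_TwoRow; infer_instance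

-- ===== CLAIM (what is proved, stated in full; the proofs are below) =====
def Claim_equal_OneRowSolution_to_TwoRow : Prop := ∀ (ori_solution : List Int), Dom_OneRowSolution_to_TwoRow ori_solution → Spec_OneRowSolution_to_TwoRow ori_solution (OneRowSolution_to_TwoRow ori_solution)

-- ===== LEMMAS AND PROOFS =====

-- common characterization: nodes = nonzero elements of the tail,
-- flags computed pairwise from (previous, current)
def fN (t : List Int) : List Int := t.filter (· ≠ 0)

def fF : Int → List Int → List Int
  | _, [] => []
  | p, x :: r => (if x = 0 then [] else if p = 0 then [1] else [0]) ++ fF x r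

def specA : List Int → List Int
  | [] => []
  | h :: t => fN t ++ fF h t

def prevOf (run : List Int) : Int := (run.getLast?).getD 0

-- committed flags of a closed run that was opened after a 0
def gF (run : List Int) : List Int :=
  if run = [] then [] else 1 :: List.replicate (run.length - 1) 0

lemma run_snoc_nz {run : List Int} {x : Int} (hrun : ∀ y ∈ run, y ≠ 0) (hx : x ≠ 0) :
    ∀ y ∈ run ++ [x], y ≠ 0 := by
  intro y hy
  rcases List.mem_append.1 hy with h | h
  · exact hrun y h
  · simp at h; subst h; exact hx

lemma prevOf_nz {run : List Int} (hrun : ∀ y ∈ run, y ≠ 0) (h : run ≠ []) :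
    prevOf run ≠ 0 := by
  have hg : run.getLast? = some (run.getLast h) := List.getLast?_eq_some_getLast h
  simp only [prevOf, hg, Option.getD_some]
  exact hrun _ (List.getLast_mem h)

-- ---- A side ----

lemma A_loop (s : List Int) : ∀ (t pre : List Int) (p : Int) (node flag : List Int),
    s = pre ++ p :: t →
    (PySem.List.pyRange ((pre.length : Int) + 1) (s.length : Int) 1).foldl (pvStepA s) (node, flag)
      = (node ++ fN t, flag ++ fF p t) := by
  intro t
  induction t with
  | nil =>
      intro pre p node flag hs
      have hlen : s.length = pre.length + 1 := by simp [hs]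
      rw [PySem.List.pyRange_one_eq_nil (by omega)]
      simp [fN, fF]
  | cons x r ih =>
      intro pre p node flag hs
      have hlen : s.length = pre.length + (r.length + 2) := by simp [hs]
      rw [PySem.List.pyRange_one_cons (by omega)]
      rw [List.foldl_cons]
      have hx : PySem.List.pyGetD s ((pre.length : Int) + 1) 0 = x := by
        have e : ((pre.length : Int) + 1) = ((pre.length + 1 : Nat) : Int) := by push_cast; ring
        rw [e, PySem.List.pyGetD_natCast]
        simp [hs, List.getD]
      have hp : PySem.List.pyGetD s ((pre.length : Int) + 1 - 1) 0 = p := by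
        have e : ((pre.length : Int) + 1 - 1) = ((pre.length : Nat) : Int) := by ring
        rw [e, PySem.List.pyGetD_natCast]
        simp [hs, List.getD]
      have hstep : pvStepA s (node, flag) ((pre.length : Int) + 1)
          = (node ++ (if x = 0 then [] else [x]),
             flag ++ (if x = 0 then [] else if p = 0 then [1] else [0])) := by
        simp only [pvStepA, hx, hp]
        by_cases h1 : x = 0 <;> by_cases h2 : p = 0 <;> simp [h1, h2]
      rw [hstep]
      have hs' : s = (pre ++ [p]) ++ x :: r := by simp [hs]
      have hlen' : ((pre ++ [p]).length : Int) + 1 = (pre.length : Int) + 1 + 1 := by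
        simp
      have hih := ih (pre ++ [p]) x (node ++ (if x = 0 then [] else [x]))
        (flag ++ (if x = 0 then [] else if p = 0 then [1] else [0])) hs'
      rw [hlen'] at hih
      rw [hih]
      simp only [Prod.mk.injEq]
      refine ⟨?_, ?_⟩
      · by_cases h1 : x = 0 <;> simp [h1, fN, List.filter]
      · by_cases h1 : x = 0 <;> by_cases h2 : p = 0 <;> simp [h1, h2, fF]

lemma A_spec (s : List Int) : OneRowSolution_to_TwoRow s = specA s := by
  cases s with
  | nil => simp [OneRowSolution_to_TwoRow, specA, PySem.List.pyRange_one_eq_nil]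
  | cons h t =>
      have hA := A_loop (h :: t) t [] h [] [] (by simp)
      rw [show ((List.length ([] : List Int) : Int) + 1) = 1 by simp] at hA
      have hdef : OneRowSolution_to_TwoRow (h :: t)
          = ((PySem.List.pyRange 1 (((h :: t).length : Nat) : Int) 1).foldl
              (pvStepA (h :: t)) ([], [])).1
            ++ ((PySem.List.pyRange 1 (((h :: t).length : Nat) : Int) 1).foldl
              (pvStepA (h :: t)) ([], [])).2 := rfl
      rw [hdef, hA]
      simp [specA]

-- ---- B side ----

lemma B_loop_false : ∀ (xs node flag run : List Int),
    (∀ y ∈ run, y ≠ 0) →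
    pvAltLoop xs node flag run false
      = (node ++ run ++ fN xs) ++ (flag ++ gF run ++ fF (prevOf run) xs) := by
  intro xs
  induction xs with
  | nil =>
      intro node flag run hrun
      simp only [pvAltLoop, pvFlush]
      by_cases h : run = [] <;> simp [h, gF, fN, fF]
  | cons x r ih =>
      intro node flag run hrun
      by_cases hx : x = 0
      · subst hx
        have hc : ¬ ((0 : Int) ≠ 0) := by simp
        simp only [pvAltLoop, if_neg hc, pvFlush]
        rw [ih _ _ [] (by simp)]
        by_cases h : run = [] <;>
          simp [h, gF, fN, fF, prevOf, List.filter, List.append_assoc]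
      · simp only [pvAltLoop, if_pos hx]
        rw [ih _ _ (run ++ [x]) (run_snoc_nz hrun hx)]
        rw [show prevOf (run ++ [x]) = x from by simp [prevOf]]
        by_cases h : run = []
        · subst h; simp [gF, prevOf, fN, fF, hx, List.filter]
        · have hlast := prevOf_nz hrun h
          have hl : run.length ≠ 0 := by simpa using h
          have hgF : gF (run ++ [x]) = gF run ++ [0] := by
            simp only [gF, if_neg (show ¬(run ++ [x] = []) from by cases run <;> simp), if_neg h]
            rw [show (run ++ [x]).length - 1 = (run.length - 1) + 1 from by
              simp only [List.length_append, List.length_cons, List.length_nil]; omega]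
            simp [List.replicate_succ']
          simp [hgF, fN, fF, hx, hlast, List.filter, List.append_assoc]

lemma B_loop_true : ∀ (xs node flag run : List Int),
    run ≠ [] → (∀ y ∈ run, y ≠ 0) →
    pvAltLoop xs node flag run true
      = (node ++ run.drop 1 ++ fN xs)
        ++ (flag ++ List.replicate (run.length - 1) 0 ++ fF (prevOf run) xs) := by
  intro xs
  induction xs with
  | nil =>
      intro node flag run hne hrun
      simp [pvAltLoop, pvFlush, fN, fF]
  | cons x r ih =>
      intro node flag run hne hrun
      by_cases hx : x = 0
      · subst hx
        have hc : ¬ ((0 : Int) ≠ 0) := by simp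
        simp only [pvAltLoop, if_neg hc, pvFlush]
        rw [B_loop_false _ _ _ [] (by simp)]
        simp [fN, fF, gF, prevOf, List.filter, List.append_assoc]
      · simp only [pvAltLoop, if_pos hx]
        rw [ih _ _ (run ++ [x]) (by simp) (run_snoc_nz hrun hx)]
        rw [show prevOf (run ++ [x]) = x from by simp [prevOf]]
        have hlast := prevOf_nz hrun hne
        have hl : run.length ≠ 0 := by simpa using hne
        have hdrop : (run ++ [x]).drop 1 = run.drop 1 ++ [x] :=
          List.drop_append_of_le_length (by omega)
        have hrep : List.replicate ((run ++ [x]).length - 1) (0 : Int)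
            = List.replicate (run.length - 1) 0 ++ [0] := by
          rw [show (run ++ [x]).length - 1 = (run.length - 1) + 1 from by
            simp only [List.length_append, List.length_cons, List.length_nil]; omega]
          simp [List.replicate_succ']
        rw [hdrop, hrep]
        rw [show run.length = (run.length - 1) + 1 from by omega] at hrep ⊢
        simp [fN, fF, hx, hlast, List.filter, List.append_assoc]

lemma B_spec (s : List Int) : OneRowSolution_to_TwoRow_alt s = specA s := by
  cases s with
  | nil => simp [OneRowSolution_to_TwoRow_alt, pvAltLoop, pvFlush, specA]
  | cons h t =>
      by_cases hh : h = 0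
      · subst hh
        have hc : ¬ ((0 : Int) ≠ 0) := by simp
        simp only [OneRowSolution_to_TwoRow_alt, pvAltLoop, if_neg hc, pvFlush]
        rw [B_loop_false _ _ _ [] (by simp)]
        simp [specA, prevOf, gF]
      · simp only [OneRowSolution_to_TwoRow_alt, pvAltLoop, if_pos hh, List.nil_append]
        rw [B_loop_true _ _ _ [h] (by simp) (by simpa using hh)]
        simp [specA, prevOf]

-- ===== VERDICT (by name: the statement is the Claim_ definition above) =====
theorem OneRowSolution_to_TwoRow_spec : Claim_equal_OneRowSolution_to_TwoRow := by
  intro s _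
  show OneRowSolution_to_TwoRow s = OneRowSolution_to_TwoRow_alt s
  rw [A_spec, B_spec]
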